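-- pv_equiv track=rewrite | github.com/mhmelshaaer/fuzzy-logic | FuzzyLogic/fuzzyLogic.py | update_dictionary
-- ===== SOURCE A (Python) =====
-- def update_dictionary(my_dict, old_val, new_val):
--     if old_val == new_val:
--         return my_dict
--
--     keys = list(my_dict.keys())
--     values = list(my_dict.values())
--
--     while old_val in my_dict.values():
--         key_index = values.index(old_val)
--         key = keys[key_index]
--         my_dict[key] = new_val
--         values[key_index] = new_val
--
--     return my_dict
-- ===== SOURCE B (Python) =====
-- def update_dictionary(my_dict, old_val, new_val):
--     for key, val in my_dict.items():
--         if val == old_val: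
--             my_dict[key] = new_val
--     return my_dict
-- ===== Notes on version B (the rewrite author's own statement) =====
-- stated objective: simpler
-- what changed: B replaces A's while-loop that repeatedly re-scans the values list with '.index'/'in' by a single pass over items() that overwrites each matching value in place.
import Mathlib
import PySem

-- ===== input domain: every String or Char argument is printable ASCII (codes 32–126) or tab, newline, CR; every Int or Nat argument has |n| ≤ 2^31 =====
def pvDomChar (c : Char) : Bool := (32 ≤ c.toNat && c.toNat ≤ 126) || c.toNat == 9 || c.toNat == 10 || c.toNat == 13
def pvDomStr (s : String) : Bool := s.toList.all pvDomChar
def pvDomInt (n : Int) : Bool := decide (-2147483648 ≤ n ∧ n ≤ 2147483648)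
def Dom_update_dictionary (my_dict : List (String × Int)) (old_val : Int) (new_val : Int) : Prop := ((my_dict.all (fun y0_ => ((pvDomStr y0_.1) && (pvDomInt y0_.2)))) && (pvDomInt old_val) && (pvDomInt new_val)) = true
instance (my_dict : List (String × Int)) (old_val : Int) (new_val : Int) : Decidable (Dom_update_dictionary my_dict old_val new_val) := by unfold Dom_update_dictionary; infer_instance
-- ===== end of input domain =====

-- B does one pass over the items, overwriting matching values in place, instead of A's
-- while-loop that repeatedly re-scans the values list with '.index' / 'in' (objective: simpler).

-- ===== PORT A =====
-- the while-loop of A: condition 'old_val in my_dict.values()', body: key_index = values.index(old_val);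
-- key = keys[key_index]; my_dict[key] = new_val; values[key_index] = new_val.
-- fuel (= initial dict size, enough under Pre_) only makes the recursion structural.
def udLoop (old_val new_val : Int) (keys : List String) :
    Nat → PySem.Dict String Int → List Int → PySem.Dict String Int
  | 0, d, _ => d
  | fuel+1, d, values =>
    if old_val ∈ PySem.Dict.values d then
      match PySem.List.index? values old_val with
      | none => d        -- Python ValueError; unreachable under Pre_
      | some i =>
        match PySem.List.pyGet? keys (i : Int) with
        | none => d      -- Python IndexError; unreachable under Pre_
        | some key =>
            udLoop old_val new_val keys fuel
              (PySem.Dict.insert d key new_val) (values.set i new_val)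
    else d

def update_dictionary (my_dict : List (String × Int)) (old_val : Int) (new_val : Int) : List (String × Int) :=
  if old_val == new_val then my_dict
  else
    let d := PySem.Dict.mk my_dict
    let keys := PySem.Dict.keys d
    let values := PySem.Dict.values d
    (udLoop old_val new_val keys my_dict.length d values).items

-- ===== PORT B =====
-- for key, val in my_dict.items(): if val == old_val: my_dict[key] = new_val  — one pass,
-- each entry rewritten independently (keys are unique in a dict).
def update_dictionary_alt (my_dict : List (String × Int)) (old_val : Int) (new_val : Int) : List (String × Int) :=
  my_dict.map (fun kv => if kv.2 == old_val then (kv.1, new_val) else kv)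

-- ===== PRECONDITION & SPEC =====
-- Pre_ excludes association lists with duplicate keys: those do not represent any Python dict
-- (a dict collapses duplicate keys before update_dictionary is ever called), and on them A's
-- port can hit the unreachable ValueError branch.
def Pre_update_dictionary (my_dict : List (String × Int)) (old_val : Int) (new_val : Int) : Prop :=
  (my_dict.map Prod.fst).Nodup
instance (my_dict : List (String × Int)) (old_val : Int) (new_val : Int) : Decidable (Pre_update_dictionary my_dict old_val new_val) := by unfold Pre_update_dictionary; infer_instance

def pvWitness_update_dictionary : (List (String × Int)) × Int × Int := ([("a", 1), ("b", 2)], 1, 3)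

def Spec_update_dictionary (my_dict : List (String × Int)) (old_val : Int) (new_val : Int) (out : List (String × Int)) : Prop := out = update_dictionary_alt my_dict old_val new_val
instance (my_dict : List (String × Int)) (old_val : Int) (new_val : Int) (out : List (String × Int)) : Decidable (Spec_update_dictionary my_dict old_val new_val out) := by unfold Spec_update_dictionary; infer_instance

-- ===== CLAIM (what is proved, stated in full; the proofs are below) =====
def Claim_equal_update_dictionary : Prop := ∀ (my_dict : List (String × Int)) (old_val : Int) (new_val : Int), Dom_update_dictionary my_dict old_val new_val → Pre_update_dictionary my_dict old_val new_val → Spec_update_dictionary my_dict old_val new_val (update_dictionary my_dict old_val new_val)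

-- ===== LEMMAS AND PROOFS =====

-- replacing position i (whose value is o) by n ≠ o removes exactly one occurrence of o
theorem count_set_of_getElem {xs : List Int} {i : Nat} {o n : Int}
    (h : i < xs.length) (hx : xs[i] = o) (hne : n ≠ o) :
    (xs.set i n).count o + 1 = xs.count o := by
  have h1 := List.set_eq_take_append_cons_drop (l := xs) (i := i) (a := n)
  have h2 := List.set_eq_take_append_cons_drop (l := xs) (i := i) (a := xs[i])
  rw [List.set_getElem_self h] at h2
  rw [if_pos h] at h1 h2
  rw [h1]; conv_rhs => rw [h2]
  simp [List.count_append, hx, hne]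
  omega

theorem map_eq_self_of_fix {α : Type} {l : List α} {f : α → α} (h : ∀ x ∈ l, f x = x) :
    l.map f = l := by
  induction l with
  | nil => rfl
  | cons a t ih => simp [h a (by simp), ih (fun x hx => h x (by simp [hx]))]

-- loop invariant: with nodup keys, enough fuel, and the values snapshot in sync with the dict,
-- the loop rewrites every entry whose value is old_val.
theorem udLoop_eq (old_val new_val : Int) (hne : ¬ old_val = new_val) :
    ∀ (fuel : Nat) (l : List (String × Int)),
      (l.map Prod.fst).Nodup →
      (l.map Prod.snd).count old_val ≤ fuel →
      udLoop old_val new_val (l.map Prod.fst) fuel (PySem.Dict.mk l) (l.map Prod.snd)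
        = PySem.Dict.mk (l.map (fun kv => if kv.2 == old_val then (kv.1, new_val) else kv)) := by
  intro fuel
  induction fuel with
  | zero =>
    intro l hnd hcnt
    have hnot : old_val ∉ l.map Prod.snd := by
      rw [← List.count_pos_iff]; omega
    simp only [udLoop]
    congr 1
    refine (map_eq_self_of_fix ?_).symm
    intro x hx
    have : x.2 ≠ old_val := fun h => hnot (h ▸ List.mem_map_of_mem hx)
    simp [this]
  | succ fuel ih =>
    intro l hnd hcnt
    by_cases hmem : old_val ∈ PySem.Dict.values (PySem.Dict.mk l)
    · have hmem' : old_val ∈ l.map Prod.snd := by simpa [PySem.Dict.values] using hmem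
      obtain ⟨i, hi⟩ : ∃ i, PySem.List.index? (l.map Prod.snd) old_val = some i := by
        have := (PySem.List.index?_isSome_iff (l.map Prod.snd) old_val).mpr hmem'
        exact Option.isSome_iff_exists.mp this
      obtain ⟨hilen, hival, -⟩ := PySem.List.getElem_of_index?_eq_some hi
      have hilen' : i < l.length := by simpa using hilen
      have hkey : PySem.List.pyGet? (l.map Prod.fst) (i : Int)
          = some ((l.map Prod.fst)[i]'(by simpa using hilen')) := by
        rw [PySem.List.pyGet?_natCast]
        exact List.getElem?_eq_getElem (by simpa using hilen')
      set key : String := (l.map Prod.fst)[i]'(by simpa using hilen') with hkeydef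
      have hkeyi : key = l[i].1 := by simp [hkeydef]
      -- the insert rewrites exactly position i
      have hcontains : PySem.Dict.contains (PySem.Dict.mk l) key = true := by
        simp only [PySem.Dict.contains]
        refine List.any_eq_true.mpr ⟨l[i], List.getElem_mem hilen', by simp [hkeyi]⟩
      have hins : PySem.Dict.insert (PySem.Dict.mk l) key new_val
          = PySem.Dict.mk (l.set i (key, new_val)) := by
        simp only [PySem.Dict.insert, hcontains, if_pos]
        congr 1
        refine List.ext_getElem (by simp) ?_
        intro j hj hj'
        simp only [List.getElem_map]
        by_cases hji : j = i
        · subst hji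
          simp [hkeyi, List.getElem_set_self]
        · have hjl : j < l.length := by simpa using hj'
          have hne2 : (l[j]'hjl).1 ≠ key := by
            intro heq
            have : (l.map Prod.fst)[j]'(by simpa using hj') = (l.map Prod.fst)[i]'(by simpa using hilen') := by
              simpa [hkeydef] using heq
            exact hji ((List.Nodup.getElem_inj_iff hnd).mp this)
          have hset : (l.set i (key, new_val))[j]'hj' = l[j]'hjl :=
            List.getElem_set_ne (by omega) hj'
          simp [hne2, hset]
      have hval : l[i].2 = old_val := by simpa using hival
      -- rewrite the recursive call's arguments into the shape of the IH at l' := l.set i (key, new_val)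
      have hfst : (l.set i (key, new_val)).map Prod.fst = l.map Prod.fst := by
        rw [List.map_set]
        exact List.set_getElem_self (by simpa using hilen')
      have hsnd : (l.set i (key, new_val)).map Prod.snd = (l.map Prod.snd).set i new_val := by
        rw [List.map_set]
      have hcnt' : ((l.map Prod.snd).set i new_val).count old_val ≤ fuel := by
        have := count_set_of_getElem (xs := l.map Prod.snd) (i := i) (o := old_val)
          (n := new_val) hilen (by simpa using hival) (fun h => hne h.symm)
        omega
      have hmapf : (l.set i (key, new_val)).map (fun kv => if kv.2 == old_val then (kv.1, new_val) else kv)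
          = l.map (fun kv => if kv.2 == old_val then (kv.1, new_val) else kv) := by
        refine List.ext_getElem (by simp) ?_
        intro j hj hj'
        simp only [List.getElem_map]
        by_cases hji : j = i
        · subst hji
          simp [List.getElem_set_self, hval, hkeyi]
        · simp [List.getElem_set_ne (by omega : ¬ i = j)]
      simp only [udLoop, if_pos hmem, hi, hkey, hins]
      rw [← hsnd]
      have := ih (l.set i (key, new_val)) (hfst ▸ hnd) (by rw [hsnd]; exact hcnt')
      rw [hfst] at this
      rw [this, hmapf]
    · have hnot : old_val ∉ l.map Prod.snd := by simpa [PySem.Dict.values] using hmem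
      simp only [udLoop, if_neg hmem]
      congr 1
      refine (map_eq_self_of_fix ?_).symm
      intro x hx
      have : x.2 ≠ old_val := fun h => hnot (h ▸ List.mem_map_of_mem hx)
      simp [this]

-- ===== VERDICT (by name: the statement is the Claim_ definition above) =====
theorem update_dictionary_spec : Claim_equal_update_dictionary := by
  intro my_dict old_val new_val _ hpre
  unfold Spec_update_dictionary update_dictionary update_dictionary_alt
  by_cases heq : old_val = new_val
  · subst heq
    simp only [beq_self_eq_true, if_pos]
    refine (map_eq_self_of_fix ?_).symm
    intro x _
    by_cases h : x.2 = old_val <;> cases x <;> simp_all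
  · have hbeq : (old_val == new_val) = false := beq_eq_false_iff_ne.mpr heq
    simp only [hbeq, Bool.false_eq_true, PySem.Dict.keys, PySem.Dict.values]
    have hcnt : (my_dict.map Prod.snd).count old_val ≤ my_dict.length := by
      have := List.count_le_length (l := my_dict.map Prod.snd) (a := old_val)
      simpa using this
    rw [udLoop_eq old_val new_val heq my_dict.length my_dict hpre hcnt]
    simp
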